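-- pv_equiv track=rewrite | github.com/SimSalabimse/NestCams | movie_2.1.py | find_motion_segments
-- ===== SOURCE A (Python) =====
-- def find_motion_segments(motion_scores, threshold=10000, min_segment_length=5, merge_gap=1):
--     """Identify all continuous segments with motion above the threshold."""
--     segments = []
--     start = None
--     duration = len(motion_scores)
--
--     for t, score in enumerate(motion_scores):
--         if score > threshold:
--             if start is None:
--                 start = t
--         else:
--             if start is not None:
--                 end = t
--                 if end - start >= min_segment_length:
--                     if segments and start - segments[-1][1] <= merge_gap:
--                         segments[-1] = (segments[-1][0], end)
--                     else:
--                         segments.append((start, end))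
--                 start = None
--
--     # Handle case where motion continues to the end
--     if start is not None:
--         end = duration
--         if end - start >= min_segment_length:
--             if segments and start - segments[-1][1] <= merge_gap:
--                 segments[-1] = (segments[-1][0], end)
--             else:
--                 segments.append((start, end))
--
--     return segments
-- ===== SOURCE B (Python) =====
-- def find_motion_segments(motion_scores, threshold=10000, min_segment_length=5, merge_gap=1):
--     """Identify all continuous segments with motion above the threshold."""
--     # Pass 1: collect all raw above-threshold runs as (start, end) pairs.
--     runs = []
--     start = None
--     for t, score in enumerate(motion_scores):
--         if score > threshold:
--             if start is None:
--                 start = t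
--         else:
--             if start is not None:
--                 runs.append((start, t))
--                 start = None
--     if start is not None:
--         runs.append((start, len(motion_scores)))
--     # Pass 2: keep only runs long enough.
--     kept = [(s, e) for (s, e) in runs if e - s >= min_segment_length]
--     # Pass 3: merge kept runs that are close to the previous accepted segment.
--     merged = []
--     for s, e in kept:
--         if merged and s - merged[-1][1] <= merge_gap:
--             merged[-1] = (merged[-1][0], e)
--         else:
--             merged.append((s, e))
--     return merged
-- ===== Notes on version B (the rewrite author's own statement) =====
-- stated objective: simpler
-- what changed: A's single scan that filters and merges segments inline at each run boundary is decomposed into three plain passes: collect raw above-threshold runs, filter out runs shorter than min_segment_length, then merge runs within merge_gap of the previous accepted segment.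
import Mathlib
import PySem

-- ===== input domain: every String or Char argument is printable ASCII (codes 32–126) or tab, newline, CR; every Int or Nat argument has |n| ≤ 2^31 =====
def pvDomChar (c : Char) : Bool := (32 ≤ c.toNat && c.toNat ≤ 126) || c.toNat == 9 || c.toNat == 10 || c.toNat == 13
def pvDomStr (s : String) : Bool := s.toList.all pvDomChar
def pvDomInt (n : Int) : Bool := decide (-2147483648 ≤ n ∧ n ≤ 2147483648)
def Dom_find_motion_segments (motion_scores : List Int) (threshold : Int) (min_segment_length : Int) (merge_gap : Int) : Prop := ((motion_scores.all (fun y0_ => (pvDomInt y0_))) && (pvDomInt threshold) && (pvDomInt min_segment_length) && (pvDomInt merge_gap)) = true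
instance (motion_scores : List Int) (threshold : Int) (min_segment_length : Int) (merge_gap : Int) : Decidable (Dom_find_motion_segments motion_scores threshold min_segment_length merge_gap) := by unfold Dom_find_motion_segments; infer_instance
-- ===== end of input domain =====

-- B replaces A's single interleaved scan (that filters and merges inside the loop) by three
-- plain passes — collect raw runs, filter by length, merge close ones; simpler, same O(n) cost.

-- ===== PORT A =====
-- A: one fold over the scores carrying (segments, start, t); the filter+merge logic runs
-- inline at every run boundary, and the trailing open run is closed with duration = len.
def find_motion_segments (motion_scores : List Int) (threshold : Int) (min_segment_length : Int) (merge_gap : Int) : List (Int × Int) :=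
  let duration : Int := motion_scores.length
  let st := motion_scores.foldl
    (fun (st : List (Int × Int) × Option Int × Int) score =>
      let (segments, start, t) := st
      if score > threshold then
        match start with
        | none => (segments, some t, t + 1)
        | some s => (segments, some s, t + 1)
      else
        match start with
        | some s =>
          if t - s ≥ min_segment_length then
            match segments.getLast? with
            | some (ps, pe) =>
              if s - pe ≤ merge_gap then (segments.dropLast ++ [(ps, t)], none, t + 1)
              else (segments ++ [(s, t)], none, t + 1)
            | none => (segments ++ [(s, t)], none, t + 1)
          else (segments, none, t + 1)
        | none => (segments, none, t + 1))
    ([], none, 0)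
  match st.2.1 with
  | some s =>
    if duration - s ≥ min_segment_length then
      match st.1.getLast? with
      | some (ps, pe) =>
        if s - pe ≤ merge_gap then st.1.dropLast ++ [(ps, duration)]
        else st.1 ++ [(s, duration)]
      | none => st.1 ++ [(s, duration)]
    else st.1
  | none => st.1

-- ===== PORT B =====
-- B's merge step: extend the last accepted segment when the gap is small, else append.
def pvMerge (merge_gap : Int) (acc : List (Int × Int)) (r : Int × Int) : List (Int × Int) :=
  match acc.getLast? with
  | some (ps, pe) =>
    if r.1 - pe ≤ merge_gap then acc.dropLast ++ [(ps, r.2)] else acc ++ [r]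
  | none => acc ++ [r]

def find_motion_segments_alt (motion_scores : List Int) (threshold : Int) (min_segment_length : Int) (merge_gap : Int) : List (Int × Int) :=
  -- pass 1: raw above-threshold runs
  let rs := motion_scores.foldl
    (fun (st : List (Int × Int) × Option Int × Int) score =>
      let (runs, start, t) := st
      if score > threshold then (runs, (if start.isNone then some t else start), t + 1)
      else
        match start with
        | some s => (runs ++ [(s, t)], none, t + 1)
        | none => (runs, none, t + 1))
    ([], none, 0)
  let runs := match rs.2.1 with
    | some s => rs.1 ++ [(s, (motion_scores.length : Int))]
    | none => rs.1
  -- pass 2: keep only runs long enough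
  let kept := runs.filter (fun r => r.2 - r.1 ≥ min_segment_length)
  -- pass 3: merge close runs
  kept.foldl (pvMerge merge_gap) []

-- ===== PRECONDITION & SPEC =====
def Spec_find_motion_segments (motion_scores : List Int) (threshold : Int) (min_segment_length : Int) (merge_gap : Int) (out : List (Int × Int)) : Prop := out = find_motion_segments_alt motion_scores threshold min_segment_length merge_gap
instance (motion_scores : List Int) (threshold : Int) (min_segment_length : Int) (merge_gap : Int) (out : List (Int × Int)) : Decidable (Spec_find_motion_segments motion_scores threshold min_segment_length merge_gap out) := by unfold Spec_find_motion_segments; infer_instance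

-- ===== CLAIM (what is proved, stated in full; the proofs are below) =====
def Claim_equal_find_motion_segments : Prop := ∀ (motion_scores : List Int) (threshold : Int) (min_segment_length : Int) (merge_gap : Int), Dom_find_motion_segments motion_scores threshold min_segment_length merge_gap → Spec_find_motion_segments motion_scores threshold min_segment_length merge_gap (find_motion_segments motion_scores threshold min_segment_length merge_gap)

-- ===== LEMMAS AND PROOFS =====

-- Proof-only copies of the two loop bodies and finishers (definitionally equal to the ports').
def stepA (th ml mg : Int) (st : List (Int × Int) × Option Int × Int) (score : Int) : List (Int × Int) × Option Int × Int :=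
  let (segments, start, t) := st
  if score > th then
    match start with
    | none => (segments, some t, t + 1)
    | some s => (segments, some s, t + 1)
  else
    match start with
    | some s =>
      if t - s ≥ ml then
        match segments.getLast? with
        | some (ps, pe) =>
          if s - pe ≤ mg then (segments.dropLast ++ [(ps, t)], none, t + 1)
          else (segments ++ [(s, t)], none, t + 1)
        | none => (segments ++ [(s, t)], none, t + 1)
      else (segments, none, t + 1)
    | none => (segments, none, t + 1)

def finishA (ml mg : Int) (st : List (Int × Int) × Option Int × Int) (D : Int) : List (Int × Int) :=
  match st.2.1 with
  | some s =>
    if D - s ≥ ml then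
      match st.1.getLast? with
      | some (ps, pe) =>
        if s - pe ≤ mg then st.1.dropLast ++ [(ps, D)]
        else st.1 ++ [(s, D)]
      | none => st.1 ++ [(s, D)]
    else st.1
  | none => st.1

def stepR (th : Int) (st : List (Int × Int) × Option Int × Int) (score : Int) : List (Int × Int) × Option Int × Int :=
  let (runs, start, t) := st
  if score > th then (runs, (if start.isNone then some t else start), t + 1)
  else
    match start with
    | some s => (runs ++ [(s, t)], none, t + 1)
    | none => (runs, none, t + 1)

def finishR (st : List (Int × Int) × Option Int × Int) (D : Int) : List (Int × Int) :=
  match st.2.1 with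
  | some s => st.1 ++ [(s, D)]
  | none => st.1

-- The list of raw runs produced from suffix `xs` starting at index `t` with open run `start`.
def runsFrom (th : Int) : List Int → Int → Option Int → List (Int × Int)
  | [], _, none => []
  | [], t, some s => [(s, t)]
  | x :: xs, t, start =>
    if x > th then runsFrom th xs (t + 1) (if start.isNone then some t else start)
    else
      match start with
      | some s => (s, t) :: runsFrom th xs (t + 1) none
      | none => runsFrom th xs (t + 1) none

-- A's per-run acceptance: merge/append only when the run is long enough.
def acceptStep (ml mg : Int) (segs : List (Int × Int)) (r : Int × Int) : List (Int × Int) :=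
  if r.2 - r.1 ≥ ml then pvMerge mg segs r else segs

-- B's runs fold, with accumulator, equals acc ++ runsFrom.
theorem runs_fold_eq (th : Int) (xs : List Int) : ∀ (t : Int) (acc : List (Int × Int)) (start : Option Int),
    finishR (xs.foldl (stepR th) (acc, start, t)) (t + (xs.length : Int)) = acc ++ runsFrom th xs t start := by
  induction xs with
  | nil =>
    intro t acc start
    cases start <;> simp [runsFrom, finishR, List.foldl]
  | cons x xs ih =>
    intro t acc start
    simp only [List.foldl, runsFrom, stepR]
    rw [show t + ((x :: xs).length : Int) = (t + 1) + (xs.length : Int) by simp; ring]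
    by_cases hx : x > th
    · simpa [hx] using ih (t + 1) acc (if start.isNone then some t else start)
    · cases start with
      | none => simpa [hx] using ih (t + 1) acc none
      | some s => simpa [hx] using ih (t + 1) (acc ++ [(s, t)]) none

-- A's whole computation equals folding acceptStep over the raw runs.
theorem A_fold_eq (th ml mg : Int) (xs : List Int) : ∀ (t : Int) (segs : List (Int × Int)) (start : Option Int),
    finishA ml mg (xs.foldl (stepA th ml mg) (segs, start, t)) (t + (xs.length : Int))
      = (runsFrom th xs t start).foldl (acceptStep ml mg) segs := by
  induction xs with
  | nil =>
    intro t segs start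
    cases start with
    | none => simp [runsFrom, finishA, List.foldl]
    | some s => simp [runsFrom, finishA, List.foldl, acceptStep, pvMerge]
  | cons x xs ih =>
    intro t segs start
    simp only [List.foldl, runsFrom, stepA]
    rw [show t + ((x :: xs).length : Int) = (t + 1) + (xs.length : Int) by simp; ring]
    by_cases hx : x > th
    · cases start with
      | none => simpa [hx] using ih (t + 1) segs (some t)
      | some s => simpa [hx] using ih (t + 1) segs (some s)
    · cases start with
      | none => simpa [hx] using ih (t + 1) segs none
      | some s =>
        have h2 := ih (t + 1) (acceptStep ml mg segs (s, t)) none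
        simp only [if_neg hx, Option.isNone_some, List.foldl_cons]
        rw [← h2]
        congr 1
        by_cases hlen : t - s ≥ ml
        · simp only [if_pos hlen, acceptStep, pvMerge]
          cases hl : segs.getLast? with
          | none => simp
          | some p =>
            obtain ⟨ps, pe⟩ := p
            by_cases hg : s - pe ≤ mg <;> simp [hg]
        · simp [acceptStep, hlen]

-- Folding acceptStep equals folding pvMerge over the length-filtered runs.
theorem accept_eq_filter_merge (ml mg : Int) (rs : List (Int × Int)) : ∀ (segs : List (Int × Int)),
    rs.foldl (acceptStep ml mg) segs
      = (rs.filter (fun r => r.2 - r.1 ≥ ml)).foldl (pvMerge mg) segs := by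
  induction rs with
  | nil => intro segs; rfl
  | cons r rs ih =>
    intro segs
    by_cases h : r.2 - r.1 ≥ ml
    · simp [List.foldl, List.filter, h, acceptStep, ih]
    · simp [List.foldl, List.filter, h, acceptStep, ih]

-- ===== VERDICT (by name: the statement is the Claim_ definition above) =====
theorem find_motion_segments_spec : Claim_equal_find_motion_segments := by
  intro ms th ml mg _
  show find_motion_segments ms th ml mg = find_motion_segments_alt ms th ml mg
  have eA : find_motion_segments ms th ml mg
      = finishA ml mg (ms.foldl (stepA th ml mg) ([], none, 0)) ((ms.length : Int)) := rfl
  have eB : find_motion_segments_alt ms th ml mg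
      = ((finishR (ms.foldl (stepR th) ([], none, 0)) ((ms.length : Int))).filter
          (fun r => r.2 - r.1 ≥ ml)).foldl (pvMerge mg) [] := rfl
  have hA := A_fold_eq th ml mg ms 0 [] none
  have hB := runs_fold_eq th ms 0 [] none
  simp only [zero_add] at hA hB
  rw [eA, eB, hA, hB, accept_eq_filter_merge]
  simp
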